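-- pv_equiv track=rewrite | github.com/NicholasLe04/Sudoku | Solver.py | distinctInBox
-- ===== SOURCE A (Python) =====
-- SubBoxes = [
--
--         [0,  1,  2,
--         9,  10, 11,
--         18, 19, 20],
--
--         [27, 28, 29,
--         36, 37, 38,
--         45, 46, 47],
--
--         [54, 55, 56,
--         63, 64, 65,
--         72, 73, 74],
--
--         [3,  4,  5,
--         12, 13, 14,
--         21, 22, 23],
--
--         [30, 31, 32,
--         39, 40, 41,
--         48, 49, 50],
--
--         [57, 58, 59,
--         66, 67, 68,
--         75, 76, 77],
--
--         [6,  7,  8,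
--         15, 16, 17,
--         24, 25, 26],
--
--         [33, 34, 35,
--         42, 43, 44,
--         51, 52, 53],
--
--         [60, 61, 62,
--         69, 70, 71,
--         78, 79, 80],
--
--     ]
--
-- def distinctInBox(board, num, position):
--         check = -1
--
--         for i in range(0,9):
--             for j in SubBoxes[i]:
--                 if j == position:
--                     check = i
--                     break
--
--         for k in SubBoxes[check]:
--             if board[k] == num:
--                 return False
--
--         return True
-- ===== SOURCE B (Python) =====
-- def distinctInBox(board, num, position):
--     base = position // 27 * 27 + position % 9 // 3 * 3
--     return all(board[base + off] != num for off in (0, 1, 2, 9, 10, 11, 18, 19, 20))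
-- ===== Notes on version B (the rewrite author's own statement) =====
-- stated objective: simpler
-- what changed: B computes the 3x3 box directly by closed-form index arithmetic (base = position//27*27 + position%9//3*3, nine fixed offsets) instead of A's 81-cell table plus a locate-by-search double loop over SubBoxes.
import Mathlib
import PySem

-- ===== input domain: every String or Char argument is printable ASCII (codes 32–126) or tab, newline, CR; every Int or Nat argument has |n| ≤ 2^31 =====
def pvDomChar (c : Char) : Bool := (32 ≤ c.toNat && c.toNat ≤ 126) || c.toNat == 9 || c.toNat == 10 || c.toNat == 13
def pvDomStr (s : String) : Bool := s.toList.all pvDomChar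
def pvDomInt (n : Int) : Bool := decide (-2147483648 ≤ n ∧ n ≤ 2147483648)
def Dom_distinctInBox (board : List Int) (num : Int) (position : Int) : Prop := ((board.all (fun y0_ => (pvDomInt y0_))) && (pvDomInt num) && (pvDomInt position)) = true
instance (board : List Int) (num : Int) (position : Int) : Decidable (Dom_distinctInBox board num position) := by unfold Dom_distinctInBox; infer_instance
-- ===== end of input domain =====

-- B replaces A's 81-cell SubBoxes table and locate-by-search double loop with
-- closed-form box arithmetic from `position` (objective: simpler).

-- ===== PORT A =====
-- the module-level SubBoxes table, verbatim
def SubBoxesL : List (List Int) :=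
  [[0, 1, 2, 9, 10, 11, 18, 19, 20],
   [27, 28, 29, 36, 37, 38, 45, 46, 47],
   [54, 55, 56, 63, 64, 65, 72, 73, 74],
   [3, 4, 5, 12, 13, 14, 21, 22, 23],
   [30, 31, 32, 39, 40, 41, 48, 49, 50],
   [57, 58, 59, 66, 67, 68, 75, 76, 77],
   [6, 7, 8, 15, 16, 17, 24, 25, 26],
   [33, 34, 35, 42, 43, 44, 51, 52, 53],
   [60, 61, 62, 69, 70, 71, 78, 79, 80]]

-- A's first double loop: for i in range(9): for j in SubBoxes[i]: if j == position: check = i; break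
-- (the break only leaves the inner loop, so the effect of iteration i is: if position ∈ SubBoxes[i] then check := i)
def checkOf (position : Int) : Int :=
  (List.range 9).foldl
    (fun c (i : Nat) => if ((SubBoxesL[i]?.getD [])).any (fun j => j == position) then (i : Int) else c)
    (-1)

-- A's second loop: for k in SubBoxes[check]: if board[k] == num: return False; return True
-- board[k] out of range is an IndexError in Python (excluded by Pre_); the port returns true there to stay total.
def scanBoxA (board : List Int) (num : Int) : List Int → Bool
  | [] => true
  | k :: rest =>
    match PySem.List.pyGet? board k with
    | some v => if v == num then false else scanBoxA board num rest
    | none => true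

def distinctInBox (board : List Int) (num : Int) (position : Int) : Bool :=
  scanBoxA board num ((PySem.List.pyGet? SubBoxesL (checkOf position)).getD [])

-- ===== PORT B =====
def offsetsB : List Int := [0, 1, 2, 9, 10, 11, 18, 19, 20]

def baseOf (position : Int) : Int :=
  PySem.Int.floordiv position 27 * 27 + PySem.Int.floordiv (PySem.Int.mod position 9) 3 * 3

-- board[base+off] out of range is an IndexError in Python (excluded by Pre_); the port returns true there to stay total.
def cellFree (board : List Int) (num : Int) (k : Int) : Bool :=
  match PySem.List.pyGet? board k with
  | some v => !(v == num)
  | none => true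

def distinctInBox_alt (board : List Int) (num : Int) (position : Int) : Bool :=
  offsetsB.all (fun off => cellFree board num (baseOf position + off))

-- ===== PRECONDITION & SPEC =====
-- Pre_ restricts to the natural domain (a real board position 0..80; for positions outside it A
-- silently falls back to the last box SubBoxes[-1], an artefact of its search loop, and is excluded)
-- and to boards on which A returns: either the whole 3x3 box is in range, or some in-range box cell
-- holds num (A returns False before reaching an out-of-range index); otherwise A raises IndexError.
def Pre_distinctInBox (board : List Int) (num : Int) (position : Int) : Prop :=
  0 ≤ position ∧ position ≤ 80 ∧
    (position / 27 * 27 + position % 9 / 3 * 3 + 20 < (board.length : Int) ∨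
      ∃ off ∈ ([0, 1, 2, 9, 10, 11, 18, 19, 20] : List Int),
        position / 27 * 27 + position % 9 / 3 * 3 + off < (board.length : Int) ∧
          PySem.List.pyGet? board (position / 27 * 27 + position % 9 / 3 * 3 + off) = some num)
instance (board : List Int) (num : Int) (position : Int) : Decidable (Pre_distinctInBox board num position) := by unfold Pre_distinctInBox; infer_instance

def pvWitness_distinctInBox : List Int × Int × Int := (List.replicate 81 0, 5, 40)

def Spec_distinctInBox (board : List Int) (num : Int) (position : Int) (out : Bool) : Prop := out = distinctInBox_alt board num position
instance (board : List Int) (num : Int) (position : Int) (out : Bool) : Decidable (Spec_distinctInBox board num position out) := by unfold Spec_distinctInBox; infer_instance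

-- ===== CLAIM (what is proved, stated in full; the proofs are below) =====
def Claim_equal_distinctInBox : Prop := ∀ (board : List Int) (num : Int) (position : Int), Dom_distinctInBox board num position → Pre_distinctInBox board num position → Spec_distinctInBox board num position (distinctInBox board num position)

-- ===== LEMMAS AND PROOFS =====

-- an index that is in range (0 ≤ x < len) yields a value
theorem pyGet?_some_of (board : List Int) (x : Int) (h0 : 0 ≤ x) (h1 : x < (board.length : Int)) :
    ∃ v, PySem.List.pyGet? board x = some v := by
  have hne : PySem.List.pyGet? board x ≠ none := by
    rw [Ne, PySem.List.pyGet?_eq_none_iff, not_not]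
    simp only [PySem.Raise.InRange]
    omega
  exact Option.ne_none_iff_exists'.mp hne

-- A's scan of a cell list whose indices are all in range equals an `all` over the same cells.
theorem scanBoxA_eq_all (board : List Int) (num : Int) (l : List Int)
    (h : ∀ k ∈ l, PySem.List.pyGet? board k ≠ none) :
    scanBoxA board num l = l.all (cellFree board num) := by
  induction l with
  | nil => rfl
  | cons k rest ih =>
    obtain ⟨v, hv⟩ := Option.ne_none_iff_exists'.mp (h k (by simp))
    have hrest := fun x hx => h x (List.mem_cons_of_mem _ hx)
    simp only [scanBoxA, List.all_cons, cellFree, hv]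
    by_cases hn : v == num <;> simp [hn, ih hrest]

-- on a strictly increasing nonneg cell list containing an in-range cell that holds num,
-- both the early-exit scan and the `all` come out false.
theorem scanBoxA_false_of_match (board : List Int) (num : Int) :
    ∀ l : List Int, l.Pairwise (· < ·) → (∀ x ∈ l, 0 ≤ x) →
      (∃ k ∈ l, k < (board.length : Int) ∧ PySem.List.pyGet? board k = some num) →
      scanBoxA board num l = false ∧ l.all (cellFree board num) = false := by
  intro l
  induction l with
  | nil => rintro _ _ ⟨k, hk, _⟩; simp at hk
  | cons x rest ih =>
    rintro hp hnn ⟨k, hkmem, hklt, hkeq⟩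
    have hx0 : 0 ≤ x := hnn x (by simp)
    have hxlt : x < (board.length : Int) := by
      rcases List.mem_cons.mp hkmem with rfl | hkr
      · exact hklt
      · exact lt_trans ((List.pairwise_cons.mp hp).1 k hkr) hklt
    obtain ⟨v, hv⟩ := pyGet?_some_of board x hx0 hxlt
    by_cases hvnum : v == num
    · simp [scanBoxA, hv, hvnum, cellFree, List.all_cons]
    · have hkrest : k ∈ rest := by
        rcases List.mem_cons.mp hkmem with rfl | h
        · rw [hv] at hkeq
          simp_all
        · exact h
      have hrec := ih (List.pairwise_cons.mp hp).2
        (fun y hy => hnn y (List.mem_cons_of_mem _ hy)) ⟨k, hkrest, hklt, hkeq⟩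
      simp [scanBoxA, hv, hvnum, cellFree, List.all_cons, hrec.1, hrec.2]

-- the closed-form base of position's box, for a real position
theorem baseOf_eq (p : Int) (h0 : 0 ≤ p) (h80 : p ≤ 80) :
    baseOf p = p / 27 * 27 + p % 9 / 3 * 3 := by
  interval_cases p <;> decide

-- for a real position 0..80, the box A locates by searching the table is exactly
-- the nine cells B computes arithmetically.
theorem cells_eq (p : Int) (h0 : 0 ≤ p) (h80 : p ≤ 80) :
    (PySem.List.pyGet? SubBoxesL (checkOf p)).getD []
      = offsetsB.map (fun off => baseOf p + off) := by
  interval_cases p <;> decide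

theorem off_bounds : ∀ off ∈ offsetsB, 0 ≤ off ∧ off ≤ 20 := by decide

-- ===== VERDICT (by name: the statement is the Claim_ definition above) =====
theorem distinctInBox_spec : Claim_equal_distinctInBox := by
  intro board num position _ hpre
  obtain ⟨h0, h80, hcase⟩ := hpre
  have hbase := baseOf_eq position h0 h80
  unfold Spec_distinctInBox distinctInBox distinctInBox_alt
  rw [cells_eq position h0 h80]
  have key : scanBoxA board num (offsetsB.map (fun off => baseOf position + off))
      = (offsetsB.map (fun off => baseOf position + off)).all (cellFree board num) := by
    rcases hcase with hall | ⟨off, hoffmem, hofflt, hoffeq⟩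
    · -- the whole box is in range
      apply scanBoxA_eq_all
      intro k hk
      rw [List.mem_map] at hk
      obtain ⟨off, hoff, rfl⟩ := hk
      have hoffb := off_bounds off hoff
      show PySem.List.pyGet? board (baseOf position + off) ≠ none
      rw [Ne, PySem.List.pyGet?_eq_none_iff, not_not]
      simp only [PySem.Raise.InRange]
      rw [hbase]
      omega
    · -- some in-range box cell holds num: both sides are false
      have hoffb := off_bounds off hoffmem
      have hmem : baseOf position + off ∈ offsetsB.map (fun o => baseOf position + o) :=
        List.mem_map.mpr ⟨off, hoffmem, rfl⟩
      have hpair : (offsetsB.map (fun o => baseOf position + o)).Pairwise (· < ·) := by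
        rw [List.pairwise_map]
        simp [offsetsB, List.pairwise_cons]
      have hnn : ∀ x ∈ offsetsB.map (fun o => baseOf position + o), 0 ≤ x := by
        intro x hx
        rw [List.mem_map] at hx
        obtain ⟨o, ho, rfl⟩ := hx
        have := off_bounds o ho
        show 0 ≤ baseOf position + o
        rw [hbase]
        omega
      have hfalse := scanBoxA_false_of_match board num _ hpair hnn
        ⟨baseOf position + off, hmem, by rw [hbase]; omega, by rw [hbase]; exact hoffeq⟩
      rw [hfalse.1, hfalse.2]
  rw [key, List.all_map]
  rfl
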